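-- pv_equiv track=rewrite | github.com/VictorGerin/Logisim_CPU | scripts/create_table.py | process
-- ===== SOURCE A (Python) =====
-- qtdOutputBits = 5
--
-- qtdInputBits = 12
--
-- def process(input):
--     i = []
--     for index in range(qtdInputBits):
--         i.append((input >> index) & 1)
--
--     outputBits = [0 for x in range(qtdOutputBits)]
--
--     outputBits[0] = (i[0] & i[1] & i[2] & i[3]) & 1
--
--     outputBits[1] = (i[3] & i[4] & i[8] | \
--                      i[2] &~i[4] & i[8] | \
--                      i[1] & i[4] &~i[8] | \
--                      i[0] &~i[4] &~i[8]) & 1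
--
--     outputBits[2] = (i[3] & i[5] & i[9] | \
--                      i[2] &~i[5] & i[9] | \
--                      i[1] & i[5] &~i[9] | \
--                      i[0] &~i[5] &~i[9]) & 1
--
--     outputBits[3] = (i[3] & i[6] & i[10] | \
--                      i[2] &~i[6] & i[10] | \
--                      i[1] & i[6] &~i[10] | \
--                      i[0] &~i[6] &~i[10]) & 1
--
--     outputBits[4] = (i[3] & i[7] & i[11] | \
--                      i[2] &~i[7] & i[11] | \
--                      i[1] & i[7] &~i[11] | \
--                      i[0] &~i[7] &~i[11]) & 1
--
--     outputVal = 0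
--     for i in range(qtdOutputBits):
--         outputVal |= outputBits[i] << i
--
--     return outputVal
-- ===== SOURCE B (Python) =====
-- def process(input):
--     i = [(input >> k) & 1 for k in range(12)]
--     out = i[0] & i[1] & i[2] & i[3]
--     for k in range(1, 5):
--         out |= i[2 * i[7 + k] + i[3 + k]] << k
--     return out
-- ===== Notes on version B (the rewrite author's own statement) =====
-- stated objective: simpler
-- what changed: Replaces the four hand-written sum-of-products boolean expressions and the separate outputBits table plus packing loop with a single loop that treats each high output bit as a four-way multiplexer selecting i[2*b+a] among the four low input bits.
import Mathlib
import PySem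

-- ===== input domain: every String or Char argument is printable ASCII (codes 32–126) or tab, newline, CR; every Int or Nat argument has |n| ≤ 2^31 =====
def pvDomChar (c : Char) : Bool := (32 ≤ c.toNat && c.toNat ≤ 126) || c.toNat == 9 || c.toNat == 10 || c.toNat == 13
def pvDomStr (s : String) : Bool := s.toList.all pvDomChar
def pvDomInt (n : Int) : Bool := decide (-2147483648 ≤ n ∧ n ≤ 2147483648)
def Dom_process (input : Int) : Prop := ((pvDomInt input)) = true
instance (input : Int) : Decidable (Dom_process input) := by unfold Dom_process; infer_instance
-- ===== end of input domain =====

-- B replaces A's four hand-written sum-of-products expressions and its outputBits table plus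
-- separate packing loop by one loop that reads each high output bit as a four-way multiplexer
-- i[2*b+a] over the four low input bits (simpler decomposition, same cost).

-- ===== PORT A =====
def process (input : Int) : Int :=
  -- i = []; for index in range(12): i.append((input >> index) & 1)
  let i : List Int := (List.range 12).foldl
    (fun acc (index : Nat) => acc ++ [PySem.Int.band (input >>> index) 1]) []
  let g : Nat → Int := fun k => i.getD k 0   -- i[k] (indices are literals 0..11, always in range)
  -- outputBits[0] .. outputBits[4], assigned into the [0]*5 table
  let o0 := PySem.Int.band (PySem.Int.band (PySem.Int.band (PySem.Int.band (g 0) (g 1)) (g 2)) (g 3)) 1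
  let sop : Nat → Nat → Int := fun a b =>    -- the common shape of outputBits[1..4]
    PySem.Int.band
      (PySem.Int.bor (PySem.Int.bor (PySem.Int.bor
        (PySem.Int.band (PySem.Int.band (g 3) (g a)) (g b))
        (PySem.Int.band (PySem.Int.band (g 2) (Int.not (g a))) (g b)))
        (PySem.Int.band (PySem.Int.band (g 1) (g a)) (Int.not (g b))))
        (PySem.Int.band (PySem.Int.band (g 0) (Int.not (g a))) (Int.not (g b)))) 1
  let outputBits : List Int := [o0, sop 4 8, sop 5 9, sop 6 10, sop 7 11]
  -- outputVal = 0; for i in range(5): outputVal |= outputBits[i] << i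
  (List.range 5).foldl (fun v (k : Nat) => PySem.Int.bor v ((outputBits.getD k 0) <<< k)) 0

-- ===== PORT B =====
def process_alt (input : Int) : Int :=
  -- i = [(input >> k) & 1 for k in range(12)]
  let i : List Int := (List.range 12).map (fun (k : Nat) => PySem.Int.band (input >>> k) 1)
  -- out = i[0] & i[1] & i[2] & i[3]
  let out0 := PySem.Int.band (PySem.Int.band (PySem.Int.band (i.getD 0 0) (i.getD 1 0)) (i.getD 2 0)) (i.getD 3 0)
  -- for k in range(1, 5): out |= i[2*i[7+k] + i[3+k]] << k   (the index is ≥ 0, so .toNat is exact)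
  (List.range' 1 4).foldl
    (fun out (k : Nat) => PySem.Int.bor out ((i.getD (2 * i.getD (7 + k) 0 + i.getD (3 + k) 0).toNat 0) <<< k)) out0

-- ===== PRECONDITION & SPEC =====
def Spec_process (input : Int) (out : Int) : Prop := out = process_alt input
instance (input : Int) (out : Int) : Decidable (Spec_process input out) := by unfold Spec_process; infer_instance

-- ===== CLAIM (what is proved, stated in full; the proofs are below) =====
def Claim_equal_process : Prop := ∀ (input : Int), Dom_process input → Spec_process input (process input)

-- ===== LEMMAS AND PROOFS =====

-- abbreviations for the proof: the k-th extracted bit, the 12-bit list, A's sum-of-products shape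
def pvBit (input : Int) (k : Nat) : Int := PySem.Int.band (input >>> k) 1

def pvBits (input : Int) : List Int :=
  [pvBit input 0, pvBit input 1, pvBit input 2, pvBit input 3, pvBit input 4, pvBit input 5,
   pvBit input 6, pvBit input 7, pvBit input 8, pvBit input 9, pvBit input 10, pvBit input 11]

def pvSop (input : Int) (a b : Nat) : Int :=
  PySem.Int.band
    (PySem.Int.bor (PySem.Int.bor (PySem.Int.bor
      (PySem.Int.band (PySem.Int.band (pvBit input 3) (pvBit input a)) (pvBit input b))
      (PySem.Int.band (PySem.Int.band (pvBit input 2) (Int.not (pvBit input a))) (pvBit input b)))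
      (PySem.Int.band (PySem.Int.band (pvBit input 1) (pvBit input a)) (Int.not (pvBit input b))))
      (PySem.Int.band (PySem.Int.band (pvBit input 0) (Int.not (pvBit input a))) (Int.not (pvBit input b)))) 1

-- every extracted bit is 0 or 1
theorem pv_bit_cases (input : Int) (k : Nat) : pvBit input k = 0 ∨ pvBit input k = 1 := by
  unfold pvBit
  rw [PySem.Int.band_one]
  have h1 := PySem.Int.mod_nonneg (input >>> k) (b := 2) (by norm_num)
  have h2 := PySem.Int.mod_lt (input >>> k) (b := 2) (by norm_num)
  omega

-- A's closed form: unfolding its two loops and the table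
theorem pv_processA_eq (input : Int) : process input =
    PySem.Int.bor (PySem.Int.bor (PySem.Int.bor (PySem.Int.bor
      (PySem.Int.bor 0
        (PySem.Int.band (PySem.Int.band (PySem.Int.band (PySem.Int.band (pvBit input 0) (pvBit input 1)) (pvBit input 2)) (pvBit input 3)) 1 <<< (0:Nat)))
      (pvSop input 4 8 <<< (1:Nat))) (pvSop input 5 9 <<< (2:Nat))) (pvSop input 6 10 <<< (3:Nat))) (pvSop input 7 11 <<< (4:Nat)) := by
  unfold process
  rw [show (List.range 12).foldl (fun acc (index : Nat) => acc ++ [PySem.Int.band (input >>> index) 1]) ([]:List Int) = pvBits input from rfl]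
  rfl

-- B's closed form: unfolding the comprehension and the mux loop
theorem pv_processB_eq (input : Int) : process_alt input =
    PySem.Int.bor (PySem.Int.bor (PySem.Int.bor (PySem.Int.bor
      (PySem.Int.band (PySem.Int.band (PySem.Int.band (pvBit input 0) (pvBit input 1)) (pvBit input 2)) (pvBit input 3))
      ((pvBits input).getD (2 * pvBit input 8 + pvBit input 4).toNat 0 <<< (1:Nat)))
      ((pvBits input).getD (2 * pvBit input 9 + pvBit input 5).toNat 0 <<< (2:Nat)))
      ((pvBits input).getD (2 * pvBit input 10 + pvBit input 6).toNat 0 <<< (3:Nat)))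
      ((pvBits input).getD (2 * pvBit input 11 + pvBit input 7).toNat 0 <<< (4:Nat)) := by
  unfold process_alt
  rw [show (List.range 12).map (fun (k : Nat) => PySem.Int.band (input >>> k) 1) = pvBits input from rfl]
  rfl

-- each sum-of-products expression IS the four-way multiplexer select (64 bit-value cases)
theorem pv_mux (b0 b1 b2 b3 a b : Int)
    (h0 : b0 = 0 ∨ b0 = 1) (h1 : b1 = 0 ∨ b1 = 1) (h2 : b2 = 0 ∨ b2 = 1) (h3 : b3 = 0 ∨ b3 = 1)
    (ha : a = 0 ∨ a = 1) (hb : b = 0 ∨ b = 1) (rest : List Int) :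
    PySem.Int.band
      (PySem.Int.bor (PySem.Int.bor (PySem.Int.bor
        (PySem.Int.band (PySem.Int.band b3 a) b)
        (PySem.Int.band (PySem.Int.band b2 (Int.not a)) b))
        (PySem.Int.band (PySem.Int.band b1 a) (Int.not b)))
        (PySem.Int.band (PySem.Int.band b0 (Int.not a)) (Int.not b))) 1
    = (b0 :: b1 :: b2 :: b3 :: rest).getD (2 * b + a).toNat 0 := by
  rcases h0 with rfl | rfl <;> rcases h1 with rfl | rfl <;> rcases h2 with rfl | rfl <;>
  rcases h3 with rfl | rfl <;> rcases ha with rfl | rfl <;> rcases hb with rfl | rfl <;> rfl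

-- A's bit 0 carries a redundant '| 0', '<< 0' and '& 1'; on 0/1 bits they are the identity
theorem pv_and4 (b0 b1 b2 b3 : Int)
    (h0 : b0 = 0 ∨ b0 = 1) (h1 : b1 = 0 ∨ b1 = 1) (h2 : b2 = 0 ∨ b2 = 1) (h3 : b3 = 0 ∨ b3 = 1) :
    PySem.Int.bor 0 (PySem.Int.band (PySem.Int.band (PySem.Int.band (PySem.Int.band b0 b1) b2) b3) 1 <<< (0:Nat))
    = PySem.Int.band (PySem.Int.band (PySem.Int.band b0 b1) b2) b3 := by
  rcases h0 with rfl | rfl <;> rcases h1 with rfl | rfl <;> rcases h2 with rfl | rfl <;>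
  rcases h3 with rfl | rfl <;> rfl

-- ===== VERDICT (by name: the statement is the Claim_ definition above) =====
theorem process_spec : Claim_equal_process := by
  intro input _
  show process input = process_alt input
  rw [pv_processA_eq, pv_processB_eq]
  simp only [pvSop, pvBits]
  rw [pv_and4 _ _ _ _ (pv_bit_cases input 0) (pv_bit_cases input 1) (pv_bit_cases input 2) (pv_bit_cases input 3)]
  rw [pv_mux _ _ _ _ _ _ (pv_bit_cases input 0) (pv_bit_cases input 1) (pv_bit_cases input 2) (pv_bit_cases input 3) (pv_bit_cases input 4) (pv_bit_cases input 8)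
      [pvBit input 4, pvBit input 5, pvBit input 6, pvBit input 7, pvBit input 8, pvBit input 9, pvBit input 10, pvBit input 11]]
  rw [pv_mux _ _ _ _ _ _ (pv_bit_cases input 0) (pv_bit_cases input 1) (pv_bit_cases input 2) (pv_bit_cases input 3) (pv_bit_cases input 5) (pv_bit_cases input 9)
      [pvBit input 4, pvBit input 5, pvBit input 6, pvBit input 7, pvBit input 8, pvBit input 9, pvBit input 10, pvBit input 11]]
  rw [pv_mux _ _ _ _ _ _ (pv_bit_cases input 0) (pv_bit_cases input 1) (pv_bit_cases input 2) (pv_bit_cases input 3) (pv_bit_cases input 6) (pv_bit_cases input 10)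
      [pvBit input 4, pvBit input 5, pvBit input 6, pvBit input 7, pvBit input 8, pvBit input 9, pvBit input 10, pvBit input 11]]
  rw [pv_mux _ _ _ _ _ _ (pv_bit_cases input 0) (pv_bit_cases input 1) (pv_bit_cases input 2) (pv_bit_cases input 3) (pv_bit_cases input 7) (pv_bit_cases input 11)
      [pvBit input 4, pvBit input 5, pvBit input 6, pvBit input 7, pvBit input 8, pvBit input 9, pvBit input 10, pvBit input 11]]
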